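-- pv_equiv track=rewrite | github.com/michlender/parse-ip | parseip/parseip_page/ParseIP.py | tofrom
-- ===== SOURCE A (Python) =====
-- def tofrom(myString):
-- 	if myString is None:
-- 		return "Please enter an IP address."
-- 	else:
-- 		myList = myString.split()
-- 		toReturn = ''
-- 		inRange = False
-- 		# find the Strings that represent IP addresses
-- 		for idx, iP in enumerate(myList):
-- 			# check if ip is in a range or independent
-- 			if is_from(iP):
-- 				inRange = True
-- 			elif is_to(iP):
-- 				toReturn += '-'
-- 				inRange = False
-- 			elif validateIP(iP):
-- 				if inRange:
-- 					toReturn += iP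
-- 				else:
-- 					toReturn += iP + '\n'
-- 			elif validateIP(iP) == False:
-- 				return "The " + str(idx+1) + " word in the input is an invalid IP address."
-- 		return toReturn
--
-- def is_from(x):
-- 	myFrom = 'from'
-- 	possibleFrom = x.lower()
-- 	if (myFrom == possibleFrom):
-- 		return True
-- 	else:
-- 		return False
--
-- def is_to(x):
-- 	myTo = 'to'
-- 	possibleTo = x.lower()
-- 	if (myTo == possibleTo):
-- 		return True
-- 	else:
-- 		return False
--
-- def validateIP(ip):
-- 	section = ip.split('.')
-- 	if len(section) != 4:
-- 		return False
-- 	for c in section: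
-- 		if len(c) > 3:
-- 			return False
-- 		if not c.isdigit():
-- 			return False
-- 		i = int(c)
-- 		if i < 0 or i > 255:
-- 			return False
-- 	return True
-- ===== SOURCE B (Python) =====
-- def tofrom(myString):
--     if myString is None:
--         return "Please enter an IP address."
--     words = myString.split()
--     # pass 1: find the first bad word (short-circuit)
--     for i, w in enumerate(words):
--         if classify(w) == 'bad':
--             return "The " + str(i + 1) + " word in the input is an invalid IP address."
--     # pass 2: pure recursive formatting
--     return render(words, False)
--
-- def classify(w):
--     l = w.lower()
--     if l == 'from':
--         return 'from'
--     if l == 'to':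
--         return 'to'
--     return 'ip' if validateIP(w) else 'bad'
--
-- def validateIP(ip):
--     parts = ip.split('.')
--     return len(parts) == 4 and all(okOctet(p) for p in parts)
--
-- def okOctet(p):
--     return len(p) <= 3 and p.isdigit() and 0 <= int(p) <= 255
--
-- def render(words, inRange):
--     if not words:
--         return ''
--     w, rest = words[0], words[1:]
--     k = classify(w)
--     if k == 'from':
--         return render(rest, True)
--     if k == 'to':
--         return '-' + render(rest, False)
--     return (w if inRange else w + '\n') + render(rest, inRange)
-- ===== Notes on version B (the rewrite author's own statement) =====
-- stated objective: alternative
-- what changed: A's single fused loop (early error return interleaved with string accumulation and the inRange flag) is replaced by two separate passes: a short-circuit scan for the first invalid word, then a pure recursive formatter; validateIP's early-return loop becomes a len==4 and all(okOctet) check.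
import Mathlib
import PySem

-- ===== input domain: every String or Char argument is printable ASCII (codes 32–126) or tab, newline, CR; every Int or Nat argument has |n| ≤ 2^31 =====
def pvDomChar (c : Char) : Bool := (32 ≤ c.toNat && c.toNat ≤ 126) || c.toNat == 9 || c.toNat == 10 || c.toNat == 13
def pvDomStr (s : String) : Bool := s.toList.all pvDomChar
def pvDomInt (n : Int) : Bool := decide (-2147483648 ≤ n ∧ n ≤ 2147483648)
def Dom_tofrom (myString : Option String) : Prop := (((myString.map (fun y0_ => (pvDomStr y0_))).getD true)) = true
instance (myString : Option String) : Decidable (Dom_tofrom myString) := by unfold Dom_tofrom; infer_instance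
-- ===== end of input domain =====

-- B replaces A's single fused loop (early error return interleaved with output building)
-- by two separate passes: an error scan, then a pure recursive formatter. Objective: alternative decomposition.

-- ===== PORT A =====
def pyIsFrom (x : String) : Bool :=
  let possibleFrom := PySem.Str.lower x
  if "from" == possibleFrom then true else false

def pyIsTo (x : String) : Bool :=
  let possibleTo := PySem.Str.lower x
  if "to" == possibleTo then true else false

def validateIPLoop : List String → Bool
  | [] => true
  | c :: rest =>
    if PySem.Str.len c > 3 then false
    else if !(PySem.Str.strIsdigit c) then false
    else
      -- int(c): isdigit has already succeeded, so int() cannot raise; getD 0 is unreachable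
      let i := (PySem.Int.ofStr? c).getD 0
      if i < 0 || i > 255 then false
      else validateIPLoop rest

def validateIP (ip : String) : Bool :=
  let sec := (PySem.Str.split? ip ".").getD []
  if sec.length ≠ 4 then false
  else validateIPLoop sec

def tofromLoop : List (Int × String) → String → Bool → String
  | [], toReturn, _ => toReturn
  | (idx, iP) :: rest, toReturn, inRange =>
    if pyIsFrom iP then tofromLoop rest toReturn true
    else if pyIsTo iP then tofromLoop rest (toReturn ++ "-") false
    else if validateIP iP then
      (if inRange then tofromLoop rest (toReturn ++ iP) inRange
       else tofromLoop rest (toReturn ++ iP ++ "\n") inRange)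
    else "The " ++ PySem.Int.toStr (idx + 1) ++ " word in the input is an invalid IP address."

def tofrom (myString : Option String) : String :=
  match myString with
  | none => "Please enter an IP address."
  | some s => tofromLoop (PySem.List.enumerate (PySem.Str.split₀ s)) "" false

-- ===== PORT B =====
def okOctetB (p : String) : Bool :=
  PySem.Str.len p ≤ 3 && PySem.Str.strIsdigit p &&
    (0 ≤ (PySem.Int.ofStr? p).getD 0 && (PySem.Int.ofStr? p).getD 0 ≤ 255)

def validateIPB (ip : String) : Bool :=
  let parts := (PySem.Str.split? ip ".").getD []
  parts.length == 4 && parts.all okOctetB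

-- 0 = 'from', 1 = 'to', 2 = 'ip', 3 = 'bad'
def classifyB (w : String) : Nat :=
  let l := PySem.Str.lower w
  if l == "from" then 0
  else if l == "to" then 1
  else if validateIPB w then 2 else 3

def firstBadB : List (Int × String) → Option Int
  | [] => none
  | (i, w) :: rest => if classifyB w == 3 then some i else firstBadB rest

def renderB : List String → Bool → String
  | [], _ => ""
  | w :: rest, inRange =>
    let k := classifyB w
    if k == 0 then renderB rest true
    else if k == 1 then "-" ++ renderB rest false
    else (if inRange then w else w ++ "\n") ++ renderB rest inRange

def tofrom_alt (myString : Option String) : String :=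
  match myString with
  | none => "Please enter an IP address."
  | some s =>
    let words := PySem.Str.split₀ s
    match firstBadB (PySem.List.enumerate words) with
    | some i => "The " ++ PySem.Int.toStr (i + 1) ++ " word in the input is an invalid IP address."
    | none => renderB words false

-- ===== PRECONDITION & SPEC =====
def Spec_tofrom (myString : Option String) (out : String) : Prop := out = tofrom_alt myString
instance (myString : Option String) (out : String) : Decidable (Spec_tofrom myString out) := by unfold Spec_tofrom; infer_instance

-- ===== CLAIM (what is proved, stated in full; the proofs are below) =====
def Claim_equal_tofrom : Prop := ∀ (myString : Option String), Dom_tofrom myString → Spec_tofrom myString (tofrom myString)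

-- ===== LEMMAS AND PROOFS =====

lemma validateIPLoop_eq (l : List String) : validateIPLoop l = l.all okOctetB := by
  induction l with
  | nil => rfl
  | cons c rest ih =>
    rw [List.all_cons, ← ih]
    simp only [validateIPLoop, okOctetB]
    have hl : PySem.Str.len c = (c.length : Int) := by
      simp [PySem.Str.len_eq]
    by_cases h3 : PySem.Str.len c > 3
    · rw [if_pos h3]
      have h3' : ¬ c.length ≤ 3 := by omega
      simp [h3']
    · rw [if_neg h3]
      have h3' : c.length ≤ 3 := by omega
      cases hd : PySem.Str.strIsdigit c with
      | false => simp
      | true =>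
        simp only [Bool.not_true, Bool.false_eq_true, if_false]
        by_cases h0 : (PySem.Int.ofStr? c).getD 0 < 0
        · have : ¬ (0 ≤ (PySem.Int.ofStr? c).getD 0) := by omega
          simp [h0, this]
        · by_cases h255 : (PySem.Int.ofStr? c).getD 0 > 255
          · have : ¬ ((PySem.Int.ofStr? c).getD 0 ≤ 255) := by omega
            simp [h0, h255, this]
          · have ha : 0 ≤ (PySem.Int.ofStr? c).getD 0 := by omega
            have hb : (PySem.Int.ofStr? c).getD 0 ≤ 255 := by omega
            simp [h0, h255, ha, hb, h3']

lemma validateIP_eq (ip : String) : validateIP ip = validateIPB ip := by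
  simp only [validateIP, validateIPB, validateIPLoop_eq]
  by_cases h : ((PySem.Str.split? ip ".").getD []).length = 4
  · simp [h]
  · simp [h]

lemma classifyB_from {w : String} (h : pyIsFrom w = true) : classifyB w = 0 := by
  simp only [pyIsFrom, classifyB] at *
  by_cases hf : PySem.Str.lower w == "from"
  · simp [hf]
  · rw [BEq.comm] at hf; simp [hf] at h

lemma classifyB_to {w : String} (hnf : pyIsFrom w = false) (h : pyIsTo w = true) :
    classifyB w = 1 := by
  simp only [pyIsFrom, pyIsTo, classifyB] at *
  by_cases hf : PySem.Str.lower w == "from"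
  · rw [BEq.comm] at hf; simp [hf] at hnf
  · by_cases ht : PySem.Str.lower w == "to"
    · simp [hf, ht]
    · rw [BEq.comm] at ht; simp [ht] at h

lemma classifyB_ip {w : String} (hnf : pyIsFrom w = false) (hnt : pyIsTo w = false)
    (hv : validateIP w = true) : classifyB w = 2 := by
  simp only [pyIsFrom, pyIsTo, classifyB] at *
  rw [validateIP_eq] at hv
  by_cases hf : PySem.Str.lower w == "from"
  · rw [BEq.comm] at hf; simp [hf] at hnf
  · by_cases ht : PySem.Str.lower w == "to"
    · rw [BEq.comm] at ht; simp [ht] at hnt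
    · simp [hf, ht, hv]

lemma classifyB_bad {w : String} (hnf : pyIsFrom w = false) (hnt : pyIsTo w = false)
    (hv : validateIP w = false) : classifyB w = 3 := by
  simp only [pyIsFrom, pyIsTo, classifyB] at *
  rw [validateIP_eq] at hv
  by_cases hf : PySem.Str.lower w == "from"
  · rw [BEq.comm] at hf; simp [hf] at hnf
  · by_cases ht : PySem.Str.lower w == "to"
    · rw [BEq.comm] at ht; simp [ht] at hnt
    · simp [hf, ht, hv]

lemma loop_eq (ws : List String) : ∀ (s : Int) (acc : String) (r : Bool),
    tofromLoop (PySem.List.enumerate ws s) acc r =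
      match firstBadB (PySem.List.enumerate ws s) with
      | some i => "The " ++ PySem.Int.toStr (i + 1) ++ " word in the input is an invalid IP address."
      | none => acc ++ renderB ws r := by
  induction ws with
  | nil => intro s acc r; simp [PySem.List.enumerate_nil, tofromLoop, firstBadB, renderB]
  | cons w rest ih =>
    intro s acc r
    rw [PySem.List.enumerate_cons]
    cases hf : pyIsFrom w with
    | true =>
      have hc := classifyB_from hf
      simp only [tofromLoop, hf, if_true, firstBadB, renderB, hc]
      simpa using ih (s + 1) acc true
    | false =>
      cases ht : pyIsTo w with
      | true =>
        have hc := classifyB_to hf ht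
        simp only [tofromLoop, hf, ht, Bool.false_eq_true, if_false, if_true, firstBadB,
          renderB, hc]
        rw [ih (s + 1) (acc ++ "-") false]
        simp only [Nat.reduceBEq]
        cases firstBadB (PySem.List.enumerate rest (s + 1)) <;>
          simp [String.append_assoc]
      | false =>
        cases hv : validateIP w with
        | true =>
          have hc := classifyB_ip hf ht hv
          simp only [tofromLoop, hf, ht, hv, Bool.false_eq_true, if_false, if_true,
            firstBadB, renderB, hc]
          cases r with
          | true =>
            rw [ih (s + 1) (acc ++ w) true]
            simp only [Nat.reduceBEq, if_true]
            cases firstBadB (PySem.List.enumerate rest (s + 1)) <;>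
              simp [String.append_assoc]
          | false =>
            rw [ih (s + 1) (acc ++ w ++ "\n") false]
            simp only [Nat.reduceBEq]
            cases firstBadB (PySem.List.enumerate rest (s + 1)) <;>
              simp [String.append_assoc]
        | false =>
          have hc := classifyB_bad hf ht hv
          simp only [tofromLoop, hf, ht, hv, Bool.false_eq_true, if_false, firstBadB, hc]
          simp [String.append_assoc]

-- ===== VERDICT (by name: the statement is the Claim_ definition above) =====
theorem tofrom_spec : Claim_equal_tofrom := by
  intro myString _
  unfold Spec_tofrom
  cases myString with
  | none => rfl
  | some s =>
    simp only [tofrom, tofrom_alt]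
    rw [loop_eq]
    cases firstBadB (PySem.List.enumerate (PySem.Str.split₀ s) 0) <;> simp
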